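-- pv_equiv track=rewrite | github.com/KSH-BD/multitenant-survey | survey/views.py | lookahead
-- ===== SOURCE A (Python) =====
-- def lookahead(iterable):
--     """Pass through all values from the given iterable, augmented by the
--     information if there are more values to come after the current one
--     (True), or if it is the last value (False).
--     """
--     it = iter(iterable)
--     try:
--         last = next(it)
--     except StopIteration:
--         return
--     for val in it:
--         yield last, True
--         last = val
--     yield last, False
-- ===== SOURCE B (Python) =====
-- def lookahead(iterable):
--     """Pass through all values from the given iterable, augmented by the
--     information if there are more values to come after the current one
--     (True), or if it is the last value (False).
--     """
--     items = list(iterable)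
--     if not items:
--         return
--     yield from zip(items, [True] * (len(items) - 1) + [False])
-- ===== Notes on version B (the rewrite author's own statement) =====
-- stated objective: alternative
-- what changed: Instead of a streaming hold-one-back loop, B materializes the iterable into a list, builds the flag list [True]*(n-1)+[False] up front, and zips values with flags (trading A's laziness on infinite iterators for a two-stage zip formulation; return values identical on lists).
import Mathlib
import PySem

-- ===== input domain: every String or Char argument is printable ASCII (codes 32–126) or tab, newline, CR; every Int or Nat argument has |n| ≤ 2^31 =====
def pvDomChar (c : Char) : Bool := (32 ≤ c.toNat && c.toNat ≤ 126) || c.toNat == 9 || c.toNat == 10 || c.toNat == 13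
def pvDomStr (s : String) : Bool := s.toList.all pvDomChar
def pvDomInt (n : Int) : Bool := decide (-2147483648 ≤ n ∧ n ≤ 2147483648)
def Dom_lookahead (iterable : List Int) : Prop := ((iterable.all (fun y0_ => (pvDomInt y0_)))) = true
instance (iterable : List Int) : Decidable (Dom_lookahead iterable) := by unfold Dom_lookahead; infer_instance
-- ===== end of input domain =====

-- B replaces A's streaming hold-one-back loop by materializing the list and zipping it with a precomputed flag list; return values identical (equivalence is about the yielded sequence; B is not lazy).

-- ===== PORT A =====
-- A primes 'last' with next(it), then loops over the rest yielding (last, True) and finally (last, False).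
def lookaheadLoopA (last : Int) : List Int → List (Int × Bool)
  | [] => [(last, false)]
  | val :: it => (last, true) :: lookaheadLoopA val it

def lookahead (iterable : List Int) : List (Int × Bool) :=
  match iterable with
  | [] => []            -- next(it) raises StopIteration → return (empty generator)
  | first :: it => lookaheadLoopA first it

-- ===== PORT B =====
-- B: items = list(iterable); if empty return []; else zip items with [True]*(n-1)+[False].
def lookahead_alt (iterable : List Int) : List (Int × Bool) :=
  let items := iterable
  if items = [] then []
  else items.zip (List.replicate (items.length - 1) true ++ [false])

-- ===== PRECONDITION & SPEC =====
def Spec_lookahead (iterable : List Int) (out : List (Int × Bool)) : Prop := out = lookahead_alt iterable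
instance (iterable : List Int) (out : List (Int × Bool)) : Decidable (Spec_lookahead iterable out) := by unfold Spec_lookahead; infer_instance

-- ===== CLAIM =====
def Claim_equal_lookahead : Prop := ∀ (iterable : List Int), Dom_lookahead iterable → Spec_lookahead iterable (lookahead iterable)

-- ===== LEMMAS AND PROOFS =====
lemma zip_flags (l : Int) (xs : List Int) :
    (l :: xs).zip (List.replicate xs.length true ++ [false]) = lookaheadLoopA l xs := by
  induction xs generalizing l with
  | nil => simp [lookaheadLoopA]
  | cons v rest ih => simp [lookaheadLoopA, List.replicate_succ, ih]

-- ===== VERDICT =====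
theorem lookahead_spec : Claim_equal_lookahead := by
  intro iterable _
  unfold Spec_lookahead lookahead lookahead_alt
  cases iterable with
  | nil => rfl
  | cons x xs => simpa using (zip_flags x xs).symm
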